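-- pv_equiv track=rewrite | github.com/emmanuel313/silver-umbrella | sin^n_solver.py | sin_reduction_string
-- ===== SOURCE A (Python) =====
-- def sin_reduction_string(exponent, var):
--     """Return a string representing ∫ sin^exponent(var) d(var)
--        using the reduction formula."""
--     if exponent == 0:
--         return var
--     elif exponent == 1:
--         return f"-cos({var})"
--     else:
--         # Check if exponent is an integer for recursive expansion
--         if isinstance(exponent, int) or (isinstance(exponent, str) and exponent.isdigit()):
--             exp_int = int(exponent)
--             if exp_int == 0:
--                 return var
--             elif exp_int == 1:
--                 return f"-cos({var})"
--             else:
--                 # Reduction: ∫ sin^n x dx = - (sin^{n-1}x cos x)/n + (n-1)/n ∫ sin^{n-2} x dx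
--                 term1 = f"-(sin({var})^{exp_int-1} * cos({var}))/{exp_int}"
--                 term2 = sin_reduction_string(exp_int - 2, var)
--                 return f"{term1} + ({exp_int-1}/{exp_int}) * ({term2})"
--         else:
--             # Symbolic exponent (like 'n')
--             return f"-(sin({var})^{{{exponent}-1}} * cos({var}))/{exponent} + ({exponent}-1)/{exponent} * ∫ sin({var})^{{{exponent}-2}} d{var}"
-- ===== SOURCE B (Python) =====
-- def sin_reduction_string(exponent, var):
--     """Return a string representing the sin^exponent reduction formula,
--        built bottom-up with an accumulator instead of recursion."""
--     if exponent == 0: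
--         return var
--     if exponent == 1:
--         return f"-cos({var})"
--     if isinstance(exponent, int) or (isinstance(exponent, str) and exponent.isdigit()):
--         n = int(exponent)
--         if n == 0:
--             return var
--         if n == 1:
--             return f"-cos({var})"
--         if n % 2 == 0:
--             acc, start = var, 2
--         else:
--             acc, start = f"-cos({var})", 3
--         for k in range(start, n + 1, 2):
--             acc = f"-(sin({var})^{k-1} * cos({var}))/{k} + ({k-1}/{k}) * ({acc})"
--         return acc
--     # Symbolic exponent (like 'n')
--     return f"-(sin({var})^{{{exponent}-1}} * cos({var}))/{exponent} + ({exponent}-1)/{exponent} * ∫ sin({var})^{{{exponent}-2}} d{var}"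
-- ===== Notes on version B (the rewrite author's own statement) =====
-- stated objective: alternative
-- what changed: The top-down recursion on the exponent is replaced by a bottom-up loop: B picks the innermost base string from the exponent's parity and iteratively wraps an accumulator for k = base+2, base+4, ..., n, so there is no call stack.
import Mathlib
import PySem

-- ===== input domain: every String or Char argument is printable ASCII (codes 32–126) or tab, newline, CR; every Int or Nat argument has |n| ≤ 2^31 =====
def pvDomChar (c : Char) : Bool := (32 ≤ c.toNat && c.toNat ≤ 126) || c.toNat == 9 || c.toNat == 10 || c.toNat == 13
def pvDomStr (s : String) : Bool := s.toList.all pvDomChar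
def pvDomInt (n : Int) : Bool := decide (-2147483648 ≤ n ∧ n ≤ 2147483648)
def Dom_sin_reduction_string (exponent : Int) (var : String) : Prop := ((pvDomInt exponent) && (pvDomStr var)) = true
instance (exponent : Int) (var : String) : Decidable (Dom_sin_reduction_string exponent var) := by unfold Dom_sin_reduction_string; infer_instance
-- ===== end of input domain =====

-- B replaces A's top-down recursion by a bottom-up accumulator loop (objective: alternative
-- decomposition, same cost).

-- ===== PORT A =====
-- Literal port of A. In Lean the exponent is an Int, so the `isinstance(int)` check is always
-- true and the digit-string / symbolic branches are unreachable; the duplicated 0/1 checks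
-- inside the else-branch collapse onto the outer ones. On exponent < 0 the Python recursion
-- never terminates (RecursionError): the `else ""` arm is only a totality guard for exactly
-- those inputs, which Pre_ excludes.
def sin_reduction_string (exponent : Int) (var : String) : String :=
  if exponent = 0 then var
  else if exponent = 1 then "-cos(" ++ var ++ ")"
  else if h : 2 ≤ exponent then
    let term1 := "-(sin(" ++ var ++ ")^" ++ PySem.Int.toStr (exponent - 1) ++ " * cos(" ++ var
      ++ "))/" ++ PySem.Int.toStr exponent
    let term2 := sin_reduction_string (exponent - 2) var
    term1 ++ " + (" ++ PySem.Int.toStr (exponent - 1) ++ "/" ++ PySem.Int.toStr exponent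
      ++ ") * (" ++ term2 ++ ")"
  else ""  -- unreachable under Pre_ (Python raises RecursionError here)
termination_by exponent.toNat
decreasing_by omega

-- ===== PORT B =====
-- Literal port of Source B: pick the innermost string from the exponent's parity, then wrap the
-- accumulator once for each k in range(start, exponent+1, 2).
def sin_reduction_string_alt (exponent : Int) (var : String) : String :=
  if exponent = 0 then var
  else if exponent = 1 then "-cos(" ++ var ++ ")"
  else
    let p := if PySem.Int.mod exponent 2 = 0 then (var, (2 : Int))
             else ("-cos(" ++ var ++ ")", (3 : Int))
    (PySem.List.pyRange p.2 (exponent + 1) 2).foldl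
      (fun acc k =>
        "-(sin(" ++ var ++ ")^" ++ PySem.Int.toStr (k - 1) ++ " * cos(" ++ var ++ "))/"
          ++ PySem.Int.toStr k ++ " + (" ++ PySem.Int.toStr (k - 1) ++ "/"
          ++ PySem.Int.toStr k ++ ") * (" ++ acc ++ ")")
      p.1

-- ===== PRECONDITION & SPEC =====
-- Pre_ excludes exactly the inputs where Python A raises (RecursionError on negative exponents).
def Pre_sin_reduction_string (exponent : Int) (var : String) : Prop := 0 ≤ exponent
instance (exponent : Int) (var : String) : Decidable (Pre_sin_reduction_string exponent var) := by
  unfold Pre_sin_reduction_string; infer_instance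
def pvWitness_sin_reduction_string : Int × String := (4, "x")

def Spec_sin_reduction_string (exponent : Int) (var : String) (out : String) : Prop :=
  out = sin_reduction_string_alt exponent var
instance (exponent : Int) (var : String) (out : String) : Decidable (Spec_sin_reduction_string exponent var out) := by
  unfold Spec_sin_reduction_string; infer_instance

-- ===== CLAIM (what is proved, stated in full; the proofs are below) =====
def Claim_equal_sin_reduction_string : Prop := ∀ (exponent : Int) (var : String),
  Dom_sin_reduction_string exponent var → Pre_sin_reduction_string exponent var →
  Spec_sin_reduction_string exponent var (sin_reduction_string exponent var)

-- ===== LEMMAS AND PROOFS =====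

-- the one-step wrapper both programs build
def pvWrap (var : String) (k : Int) (s : String) : String :=
  "-(sin(" ++ var ++ ")^" ++ PySem.Int.toStr (k - 1) ++ " * cos(" ++ var ++ "))/"
    ++ PySem.Int.toStr k ++ " + (" ++ PySem.Int.toStr (k - 1) ++ "/"
    ++ PySem.Int.toStr k ++ ") * (" ++ s ++ ")"

lemma pvFmod_two (e : Int) : PySem.Int.mod e 2 = e % 2 := by
  simp [PySem.Int.mod, Int.fmod_eq_emod]

lemma pvPyRange_two_succ (a n : Int) (h1 : a ≤ n) (h2 : (2:Int) ∣ n - a) :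
    PySem.List.pyRange a (n + 1) 2 = PySem.List.pyRange a (n - 1) 2 ++ [n] := by
  obtain ⟨m, hm⟩ := h2
  have hm0 : 0 ≤ m := by omega
  rw [PySem.List.pyRange_of_pos a (n + 1) (by norm_num : (0:Int) < 2),
      PySem.List.pyRange_of_pos a (n - 1) (by norm_num : (0:Int) < 2)]
  have hc1 : (if a < n + 1 then ((n + 1 - a + 2 - 1) / 2).toNat else 0) = m.toNat + 1 := by
    rw [if_pos (by omega)]; omega
  have hc2 : (if a < n - 1 then ((n - 1 - a + 2 - 1) / 2).toNat else 0) = m.toNat := by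
    by_cases h : a < n - 1
    · rw [if_pos h]; omega
    · rw [if_neg h]; omega
  rw [hc1, hc2]
  simp [List.range_succ]
  omega

lemma pvA_step (e : Int) (var : String) (h : 2 ≤ e) :
    sin_reduction_string e var = pvWrap var e (sin_reduction_string (e - 2) var) := by
  rw [sin_reduction_string]
  rw [if_neg (by omega : ¬ e = 0), if_neg (by omega : ¬ e = 1), dif_pos h]
  rfl

lemma pvAlt_step (e : Int) (var : String) (h : 2 ≤ e) :
    sin_reduction_string_alt e var = pvWrap var e (sin_reduction_string_alt (e - 2) var) := by
  by_cases hpar : e % 2 = 0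
  · -- even: start = 2
    have hdvd : (2:Int) ∣ e - 2 := by omega
    by_cases he2 : e = 2
    · subst he2
      simp only [sin_reduction_string_alt]
      norm_num [pvFmod_two, pvWrap]
      rw [show PySem.List.pyRange 2 3 2 = [2] from by decide]
      norm_num [List.foldl]
    · have h4 : 4 ≤ e := by omega
      simp only [sin_reduction_string_alt]
      rw [if_neg (by omega : ¬ e = 0), if_neg (by omega : ¬ e = 1),
          if_neg (by omega : ¬ e - 2 = 0), if_neg (by omega : ¬ e - 2 = 1)]
      rw [pvFmod_two, pvFmod_two, if_pos hpar, if_pos (by omega : (e - 2) % 2 = 0)]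
      rw [pvPyRange_two_succ 2 e (by omega) (by omega)]
      have : e - 2 + 1 = e - 1 := by omega
      rw [this, List.foldl_append]
      rfl
  · -- odd: start = 3
    have h3 : 3 ≤ e := by omega
    by_cases he3 : e = 3
    · subst he3
      simp only [sin_reduction_string_alt]
      norm_num [pvFmod_two, pvWrap]
      rw [show PySem.List.pyRange 3 4 2 = [3] from by decide]
      norm_num [List.foldl]
    · have h5 : 5 ≤ e := by omega
      simp only [sin_reduction_string_alt]
      rw [if_neg (by omega : ¬ e = 0), if_neg (by omega : ¬ e = 1),
          if_neg (by omega : ¬ e - 2 = 0), if_neg (by omega : ¬ e - 2 = 1)]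
      rw [pvFmod_two, pvFmod_two, if_neg hpar, if_neg (by omega : ¬ (e - 2) % 2 = 0)]
      rw [pvPyRange_two_succ 3 e (by omega) (by omega)]
      have : e - 2 + 1 = e - 1 := by omega
      rw [this, List.foldl_append]
      rfl

lemma pvAB (n : Nat) : ∀ (e : Int) (var : String), 0 ≤ e → e.toNat ≤ n →
    sin_reduction_string e var = sin_reduction_string_alt e var := by
  induction n with
  | zero =>
    intro e var h0 hle
    have he : e = 0 := by omega
    subst he
    rw [sin_reduction_string]
    simp [sin_reduction_string_alt]
  | succ n ih =>
    intro e var h0 hle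
    by_cases he0 : e = 0
    · subst he0
      rw [sin_reduction_string]
      simp [sin_reduction_string_alt]
    by_cases he1 : e = 1
    · subst he1
      rw [sin_reduction_string]
      simp [sin_reduction_string_alt]
    have h2 : 2 ≤ e := by omega
    rw [pvA_step e var h2, pvAlt_step e var h2, ih (e - 2) var (by omega) (by omega)]

-- ===== VERDICT (by name: the statement is the Claim_ definition above) =====
theorem sin_reduction_string_spec : Claim_equal_sin_reduction_string := by
  intro e var _ hpre
  unfold Spec_sin_reduction_string
  exact pvAB e.toNat e var hpre le_rfl
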